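-- pv_equiv track=rewrite | github.com/alexsandroccarv/Retorica | dynamize/stemmer.py | vonmon_authors_matrix
-- ===== SOURCE A (Python) =====
-- import itertools
--
-- def vonmon_authors_matrix(documents):
--     """Filter out authors with less than two documents and generate the
--     authors matrix required by vonmon.
--
--     Returns a tuple (authors, labels)
--     """
--     # Sort by author, convert to list
--     documents = sorted(documents, key=lambda d: d[1])
--
--     labels = []
--     authors = []
--     first_col = 0
--
--     for (author, group) in itertools.groupby(documents, key=lambda x: x[1]):
--         group = list(group)
--
--         # Ignore authors with only one document
--         if len(group) < 2:
--             continue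
--
--         last = first_col + len(group) - 1
--         first = first_col
--
--         labels.extend([label for (label, _) in group])
--         authors.append((first, last))
--
--         first_col = last + 1
--
--     return authors, labels
-- ===== SOURCE B (Python) =====
-- def vonmon_authors_matrix(documents):
--     """Filter out authors with less than two documents and generate the
--     authors matrix required by vonmon.
--
--     Returns a tuple (authors, labels)
--     """
--     # Group labels per author in one hash-table pass -- no sort of the
--     # documents at all; only the distinct authors are sorted.  Python's
--     # sort is stable, so per-author label order is the original order,
--     # exactly what A's sorted-then-groupby pass yields.
--     groups = {}
--     for (label, author) in documents:
--         groups.setdefault(author, []).append(label)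
--
--     authors = []
--     labels = []
--     col = 0
--     for author in sorted(groups):
--         ls = groups[author]
--         if len(ls) < 2:
--             continue
--         authors.append((col, col + len(ls) - 1))
--         labels.extend(ls)
--         col += len(ls)
--
--     return authors, labels
-- ===== Notes on version B (the rewrite author's own statement) =====
-- stated objective: alternative
-- what changed: Replaces A's sort-of-all-documents + itertools.groupby scan with a single hash-table pass that groups labels per author and a sort of only the distinct authors; sort stability guarantees the per-author label order is identical.
import Mathlib
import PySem

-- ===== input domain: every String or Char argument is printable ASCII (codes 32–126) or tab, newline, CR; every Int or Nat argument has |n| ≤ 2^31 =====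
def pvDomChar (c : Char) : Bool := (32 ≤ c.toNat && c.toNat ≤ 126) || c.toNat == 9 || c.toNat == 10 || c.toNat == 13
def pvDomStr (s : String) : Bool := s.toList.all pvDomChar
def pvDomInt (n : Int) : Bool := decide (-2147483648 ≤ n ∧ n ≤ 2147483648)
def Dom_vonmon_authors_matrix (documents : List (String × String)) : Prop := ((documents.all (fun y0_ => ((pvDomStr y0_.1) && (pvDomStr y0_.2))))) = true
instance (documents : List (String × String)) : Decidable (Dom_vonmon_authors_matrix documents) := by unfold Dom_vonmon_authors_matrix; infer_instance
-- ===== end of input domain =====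

-- B groups the labels per author with one hash-table pass and sorts only the
-- distinct authors, instead of sorting the whole document list and scanning it
-- with groupby; sort stability makes the label order identical (alternative).

-- ===== PORT A =====
-- itertools.groupby(docs, key=lambda x: x[1]) materialised group by group:
-- consecutive runs of equal second components, as (author, run) pairs.
def pvRuns : List (String × String) → List (String × List (String × String))
  | [] => []
  | x :: t =>
      (x.2, x :: t.takeWhile (fun y => y.2 == x.2)) :: pvRuns (t.dropWhile (fun y => y.2 == x.2))
termination_by l => l.length
decreasing_by
  simp only [List.length_cons]
  have := (t.dropWhile_sublist (p := fun y => y.2 == x.2)).length_le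
  omega

def vonmon_authors_matrix (documents : List (String × String)) : (List (Int × Int)) × List String :=
  let docs := PySem.List.sorted documents (fun d => d.2) false
  let st := (pvRuns docs).foldl
    (fun (st : List String × List (Int × Int) × Int) ag =>
      let labels := st.1
      let authors := st.2.1
      let first_col := st.2.2
      let group := ag.2
      if group.length < 2 then st
      else
        let last := first_col + (group.length : Int) - 1
        let first := first_col
        (labels ++ group.map (·.1), authors ++ [(first, last)], last + 1))
    ([], [], 0)
  (st.2.1, st.1)

-- ===== PORT B =====
def vonmon_authors_matrix_alt (documents : List (String × String)) : (List (Int × Int)) × List String :=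
  -- groups = {}; for (label, author) in documents: groups.setdefault(author, []).append(label)
  let groups := documents.foldl (fun d p => d.modify p.2 [] (· ++ [p.1]))
    (PySem.Dict.empty : PySem.Dict String (List String))
  -- for author in sorted(groups): …
  let st := (PySem.List.sorted groups.keys (fun x => x) false).foldl
    (fun (st : List (Int × Int) × List String × Int) a =>
      let ls := groups.getD a []
      if ls.length < 2 then st
      else (st.1 ++ [(st.2.2, st.2.2 + (ls.length : Int) - 1)], st.2.1 ++ ls,
            st.2.2 + (ls.length : Int)))
    ([], [], 0)
  (st.1, st.2.1)

-- ===== PRECONDITION & SPEC =====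
def Spec_vonmon_authors_matrix (documents : List (String × String)) (out : (List (Int × Int)) × List String) : Prop := out = vonmon_authors_matrix_alt documents
instance (documents : List (String × String)) (out : (List (Int × Int)) × List String) : Decidable (Spec_vonmon_authors_matrix documents out) := by unfold Spec_vonmon_authors_matrix; infer_instance

-- ===== CLAIM (what is proved, stated in full; the proofs are below) =====
def Claim_equal_vonmon_authors_matrix : Prop := ∀ (documents : List (String × String)), Dom_vonmon_authors_matrix documents → Spec_vonmon_authors_matrix documents (vonmon_authors_matrix documents)

-- ===== LEMMAS AND PROOFS =====

-- the groups flatten back to the grouped list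
theorem pvRuns_flatMap (s : List (String × String)) : (pvRuns s).flatMap (·.2) = s := by
  induction s using pvRuns.induct with
  | case1 => simp [pvRuns]
  | case2 x t ih =>
      simp [pvRuns, List.flatMap_cons, ih, List.takeWhile_append_dropWhile]

-- each group is nonempty and all its members carry the group's author
theorem pvRuns_group_key (s : List (String × String)) {a : String}
    {g : List (String × String)} (h : (a, g) ∈ pvRuns s) :
    g ≠ [] ∧ ∀ p ∈ g, p.2 = a := by
  induction s using pvRuns.induct with
  | case1 => simp [pvRuns] at h
  | case2 x t ih =>
      rw [pvRuns] at h
      rcases List.mem_cons.1 h with h | h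
      · rcases Prod.mk.injEq .. ▸ h with ⟨ha, hg⟩
        subst ha; subst hg
        refine ⟨by simp, ?_⟩
        intro p hp
        rcases List.mem_cons.1 hp with rfl | hp
        · rfl
        · simpa using (List.mem_takeWhile_imp hp)
      · exact ih h

-- every group author is the key of some member of the grouped list
theorem pvRuns_author_mem (s : List (String × String)) {a : String}
    (h : a ∈ (pvRuns s).map (·.1)) : ∃ p ∈ s, p.2 = a := by
  rcases List.mem_map.1 h with ⟨⟨a', g⟩, hmem, rfl⟩
  obtain ⟨hne, hkey⟩ := pvRuns_group_key s hmem
  rcases List.exists_mem_of_ne_nil g hne with ⟨p, hp⟩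
  refine ⟨p, ?_, hkey p hp⟩
  have : p ∈ (pvRuns s).flatMap (·.2) := List.mem_flatMap.2 ⟨(a', g), hmem, hp⟩
  rwa [pvRuns_flatMap] at this

-- what dropWhile leaves of a key-sorted list has keys strictly above the head's
theorem pvDrop_lt (x : String × String) (t : List (String × String))
    (hs : (x :: t).Pairwise (fun p q => p.2 ≤ q.2)) :
    ∀ p ∈ t.dropWhile (fun y => y.2 == x.2), x.2 < p.2 := by
  induction t with
  | nil => simp
  | cons y t' ih =>
      rcases List.pairwise_cons.1 hs with ⟨hx, ht⟩
      by_cases hy : y.2 == x.2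
      · rw [show (y :: t').dropWhile (fun y => y.2 == x.2) = t'.dropWhile (fun y => y.2 == x.2) from by
          simp [hy]]
        apply ih
        exact List.pairwise_cons.2 ⟨fun p hp => hx p (List.mem_cons_of_mem _ hp), (List.pairwise_cons.1 ht).2⟩
      · rw [show (y :: t').dropWhile (fun y => y.2 == x.2) = y :: t' from by
          simp [hy]]
        intro p hp
        have hxy : x.2 < y.2 :=
          lt_of_le_of_ne (hx y (List.mem_cons_self ..)) (Ne.symm (by simpa using hy))
        rcases List.mem_cons.1 hp with rfl | hp
        · exact hxy
        · exact lt_of_lt_of_le hxy ((List.pairwise_cons.1 ht).1 p hp)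

-- on a key-sorted list the group authors strictly increase
theorem pvRuns_authors_lt (s : List (String × String))
    (hs : s.Pairwise (fun p q => p.2 ≤ q.2)) :
    ((pvRuns s).map (·.1)).Pairwise (· < ·) := by
  induction s using pvRuns.induct with
  | case1 => simp [pvRuns]
  | case2 x t ih =>
      rw [pvRuns]
      rcases List.pairwise_cons.1 hs with ⟨hx, ht⟩
      have hr : (t.dropWhile (fun y => y.2 == x.2)).Pairwise (fun p q => p.2 ≤ q.2) :=
        ht.sublist (List.dropWhile_sublist _)
      refine List.pairwise_cons.2 ⟨?_, ih hr⟩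
      intro a ha
      rcases pvRuns_author_mem _ ha with ⟨p, hp, rfl⟩
      exact pvDrop_lt x t hs p hp

-- on a key-sorted list each group IS the filter of the list by its author
theorem pvRuns_filter (s : List (String × String))
    (hs : s.Pairwise (fun p q => p.2 ≤ q.2)) {a : String}
    {g : List (String × String)} (h : (a, g) ∈ pvRuns s) :
    s.filter (fun p => p.2 == a) = g := by
  induction s using pvRuns.induct with
  | case1 => simp [pvRuns] at h
  | case2 x t ih =>
      rw [pvRuns] at h
      have hsplit : t = t.takeWhile (fun y => y.2 == x.2) ++ t.dropWhile (fun y => y.2 == x.2) :=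
        (List.takeWhile_append_dropWhile ..).symm
      have htw : ∀ p ∈ t.takeWhile (fun y => y.2 == x.2), p.2 = x.2 := by
        intro p hp; simpa using List.mem_takeWhile_imp hp
      have hdrop := pvDrop_lt x t hs
      have hr : (t.dropWhile (fun y => y.2 == x.2)).Pairwise (fun p q => p.2 ≤ q.2) :=
        ((List.pairwise_cons.1 hs).2).sublist (List.dropWhile_sublist _)
      rcases List.mem_cons.1 h with h | h
      · rcases Prod.mk.injEq .. ▸ h with ⟨ha, hg⟩
        subst ha; subst hg
        conv_lhs => rw [show x :: t = (x :: t.takeWhile (fun y => y.2 == x.2)) ++ t.dropWhile (fun y => y.2 == x.2) from by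
          rw [List.cons_append, ← hsplit]]
        rw [List.filter_append, List.filter_eq_self.2, List.filter_eq_nil_iff.2]
        · simp
        · intro p hp
          exact by simpa using (ne_of_gt (hdrop p hp))
        · intro p hp
          rcases List.mem_cons.1 hp with rfl | hp
          · simp
          · simpa using htw p hp
      · have hmem : a ∈ (pvRuns (t.dropWhile (fun y => y.2 == x.2))).map (·.1) :=
          List.mem_map.2 ⟨(a, g), h, rfl⟩
        rcases pvRuns_author_mem _ hmem with ⟨q, hq, rfl⟩
        have hlt := hdrop q hq
        conv_lhs => rw [show x :: t = (x :: t.takeWhile (fun y => y.2 == x.2)) ++ t.dropWhile (fun y => y.2 == x.2) from by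
          rw [List.cons_append, ← hsplit]]
        rw [List.filter_append, List.filter_eq_nil_iff.2, List.nil_append, ih hr h]
        intro p hp
        have hpx : p.2 = x.2 := by
          rcases List.mem_cons.1 hp with rfl | hp
          · rfl
          · exact htw p hp
        simpa [hpx] using (ne_of_lt hlt)

-- inserting an element keeps a key-sorted list key-sorted
theorem pvInsertBy_pairwise (x : String × String) (ys : List (String × String))
    (h : ys.Pairwise (fun p q => p.2 ≤ q.2)) :
    (PySem.List.insertBy (fun a b => decide (a.2 < b.2)) x ys).Pairwise (fun p q => p.2 ≤ q.2) := by
  induction ys with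
  | nil => simp [PySem.List.insertBy]
  | cons y ys ih =>
      rcases List.pairwise_cons.1 h with ⟨hy, ht⟩
      rw [PySem.List.insertBy]
      by_cases hb : x.2 < y.2
      · rw [if_pos (by simpa using hb)]
        refine List.pairwise_cons.2 ⟨?_, h⟩
        intro p hp
        rcases List.mem_cons.1 hp with rfl | hp
        · exact le_of_lt hb
        · exact le_trans (le_of_lt hb) (hy p hp)
      · rw [if_neg (by simpa using hb)]
        refine List.pairwise_cons.2 ⟨?_, ih ht⟩
        intro p hp
        rcases (PySem.List.mem_insertBy _ _ _ _).1 hp with rfl | hp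
        · exact le_of_not_gt hb
        · exact hy p hp

-- STABILITY, one step: on a key-sorted list, insertion appends to the key class
theorem pvFilter_insertBy (a : String) (x : String × String) (ys : List (String × String))
    (h : ys.Pairwise (fun p q => p.2 ≤ q.2)) :
    (PySem.List.insertBy (fun p q => decide (p.2 < q.2)) x ys).filter (fun p => p.2 == a)
      = ys.filter (fun p => p.2 == a) ++ (if x.2 == a then [x] else []) := by
  induction ys with
  | nil =>
      by_cases hxa : (x.2 == a) = true <;>
        simp [PySem.List.insertBy, hxa]
  | cons y ys ih =>
      rcases List.pairwise_cons.1 h with ⟨hy, ht⟩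
      rw [PySem.List.insertBy]
      by_cases hb : x.2 < y.2
      · rw [if_pos (by simpa using hb)]
        by_cases hxa : (x.2 == a) = true
        · -- key x = a < y.2 ≤ every later key: the old filter at a is empty
          have hya : ¬ (y.2 == a) = true := by
            have : a < y.2 := (eq_of_beq hxa) ▸ hb
            simpa using (ne_of_lt this).symm
          have hnil : ys.filter (fun p => p.2 == a) = [] := by
            rw [List.filter_eq_nil_iff]
            intro p hp
            have : a < p.2 := lt_of_lt_of_le ((eq_of_beq hxa) ▸ hb) (hy p hp)
            simpa using (ne_of_lt this).symm
          rw [List.filter_cons, if_pos hxa, List.filter_cons, if_neg hya, hnil, if_pos hxa]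
          simp
        · rw [List.filter_cons, if_neg hxa, if_neg hxa, List.append_nil]
      · rw [if_neg (by simpa using hb)]
        rw [List.filter_cons, List.filter_cons, ih ht]
        by_cases hy2 : (y.2 == a) = true
        · rw [if_pos hy2, if_pos hy2, List.cons_append]
        · rw [if_neg hy2, if_neg hy2]

-- STABILITY of the insertion-sort fold: key classes come out in input order
theorem pvFilter_foldl_insertBy (a : String) (xs acc : List (String × String))
    (hacc : acc.Pairwise (fun p q => p.2 ≤ q.2)) :
    (xs.foldl (fun acc x => PySem.List.insertBy (fun p q => decide (p.2 < q.2)) x acc) acc).filter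
        (fun p => p.2 == a)
      = acc.filter (fun p => p.2 == a) ++ xs.filter (fun p => p.2 == a) := by
  induction xs generalizing acc with
  | nil => simp
  | cons x xs ih =>
      rw [List.foldl_cons, ih _ (pvInsertBy_pairwise x acc hacc), pvFilter_insertBy a x acc hacc]
      by_cases hxa : x.2 == a
      · simp [List.filter, hxa]
      · simp [List.filter, hxa]

-- STABILITY of PySem.List.sorted by the second component
theorem pvSorted_filter (documents : List (String × String)) (a : String) :
    (PySem.List.sorted documents (fun d => d.2) false).filter (fun p => p.2 == a)
      = documents.filter (fun p => p.2 == a) := by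
  rw [PySem.List.sorted_eq_foldl_insertBy, pvFilter_foldl_insertBy a documents [] (by simp)]
  simp

-- the ranges produced from a list of kept group sizes starting at column c
def pvRanges : List Int → Int → List (Int × Int)
  | [], _ => []
  | n :: t, c => (c, c + n - 1) :: pvRanges t (c + n)

-- the kept group sizes, in group order
def pvKeptLens : List (String × List (String × String)) → List Int
  | [] => []
  | ag :: rs => if ag.2.length < 2 then pvKeptLens rs else (ag.2.length : Int) :: pvKeptLens rs

-- closed form of A's fold over the groups
theorem pvFoldA (rs : List (String × List (String × String)))
    (lb : List String) (au : List (Int × Int)) (fc : Int) :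
    rs.foldl (fun (st : List String × List (Int × Int) × Int) ag =>
        if ag.2.length < 2 then st
        else (st.1 ++ ag.2.map (·.1), st.2.1 ++ [(st.2.2, st.2.2 + (ag.2.length : Int) - 1)],
              st.2.2 + (ag.2.length : Int) - 1 + 1))
      (lb, au, fc)
    = (lb ++ rs.flatMap (fun ag => if ag.2.length < 2 then [] else ag.2.map (·.1)),
       au ++ pvRanges (pvKeptLens rs) fc,
       fc + (pvKeptLens rs).sum) := by
  induction rs generalizing lb au fc with
  | nil => simp [pvKeptLens, pvRanges]
  | cons ag rs ih =>
      rw [List.foldl_cons]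
      by_cases hlen : ag.2.length < 2
      · rw [if_pos hlen, ih]
        simp only [pvKeptLens, List.flatMap_cons]
        rw [if_pos hlen, if_pos hlen]
        simp
      · rw [if_neg hlen, ih]
        have harith : fc + (ag.2.length : Int) - 1 + 1 = fc + (ag.2.length : Int) := by ring
        rw [harith]
        simp only [pvKeptLens, List.flatMap_cons]
        rw [if_neg hlen, if_neg hlen]
        simp only [pvRanges, List.sum_cons, Prod.mk.injEq]
        refine ⟨by simp [List.append_assoc], by simp [List.append_assoc], by omega⟩

-- the kept group sizes read from a list of authors through g
def pvKeptLensG : List String → (String → List String) → List Int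
  | [], _ => []
  | a :: t, g => if (g a).length < 2 then pvKeptLensG t g else ((g a).length : Int) :: pvKeptLensG t g

-- closed form of B's fold over the sorted authors
theorem pvFoldB (ks : List String) (g : String → List String)
    (au : List (Int × Int)) (lb : List String) (col : Int) :
    ks.foldl (fun (st : List (Int × Int) × List String × Int) a =>
        if (g a).length < 2 then st
        else (st.1 ++ [(st.2.2, st.2.2 + ((g a).length : Int) - 1)], st.2.1 ++ g a,
              st.2.2 + ((g a).length : Int)))
      (au, lb, col)
    = (au ++ pvRanges (pvKeptLensG ks g) col,
       lb ++ ks.flatMap (fun a => if (g a).length < 2 then [] else g a),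
       col + (pvKeptLensG ks g).sum) := by
  induction ks generalizing au lb col with
  | nil => simp [pvKeptLensG, pvRanges]
  | cons a ks ih =>
      rw [List.foldl_cons]
      by_cases hlen : (g a).length < 2
      · rw [if_pos hlen, ih]
        simp only [pvKeptLensG, List.flatMap_cons]
        rw [if_pos hlen, if_pos hlen]
        simp
      · rw [if_neg hlen, ih]
        simp only [pvKeptLensG, List.flatMap_cons]
        rw [if_neg hlen, if_neg hlen]
        simp only [pvRanges, List.sum_cons, Prod.mk.injEq]
        refine ⟨by simp [List.append_assoc], by simp [List.append_assoc], by omega⟩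

theorem pvFlatMapCongr {α β : Type} (l : List α) {f g : α → List β}
    (h : ∀ x ∈ l, f x = g x) : l.flatMap f = l.flatMap g := by
  induction l with
  | nil => rfl
  | cons x l ih =>
      rw [List.flatMap_cons, List.flatMap_cons, h x (List.mem_cons_self ..),
        ih (fun y hy => h y (List.mem_cons_of_mem _ hy))]

-- B's kept lengths over the run authors are A's kept lengths
theorem pvKL (g : String → List String) (rs : List (String × List (String × String)))
    (hg : ∀ ag ∈ rs, g ag.1 = ag.2.map (·.1)) :
    pvKeptLensG (rs.map (·.1)) g = pvKeptLens rs := by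
  induction rs with
  | nil => rfl
  | cons ag rs ih =>
      have hcg := hg ag (List.mem_cons_self ..)
      have htail := ih (fun bg hbg => hg bg (List.mem_cons_of_mem _ hbg))
      simp only [List.map_cons, pvKeptLensG, pvKeptLens, hcg, List.length_map, htail]

-- ===== VERDICT (by name: the statement is the Claim_ definition above) =====
theorem vonmon_authors_matrix_spec : Claim_equal_vonmon_authors_matrix := by
  intro documents _
  unfold Spec_vonmon_authors_matrix vonmon_authors_matrix vonmon_authors_matrix_alt
  simp only []
  set s := PySem.List.sorted documents (fun d => d.2) false with hs_def
  set groups := documents.foldl (fun d p => d.modify p.2 [] (· ++ [p.1]))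
    (PySem.Dict.empty : PySem.Dict String (List String)) with hg_def
  have hpw : s.Pairwise (fun p q => p.2 ≤ q.2) := PySem.List.sorted_pairwise ..
  have hperm : s.Perm documents := PySem.List.sorted_perm ..
  -- groups[a] = labels of a's documents in input order
  have hget : ∀ a, groups.getD a [] = (documents.filter (fun p => p.2 == a)).map (·.1) := by
    intro a
    have hswap : documents.foldl (fun d p => d.modify p.2 [] (· ++ [p.1]))
        (PySem.Dict.empty : PySem.Dict String (List String))
        = (documents.map (fun p => (p.2, p.1))).foldl (fun d p => d.modify p.1 [] (· ++ [p.2]))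
          PySem.Dict.empty := by
      rw [List.foldl_map]
    rw [hg_def, hswap, PySem.Dict.getD_foldl_modify_append, PySem.Dict.getD_empty]
    simp [List.filter_map, Function.comp_def]
  -- groups[a] = the run of a in the sorted list (stability)
  have hrun : ∀ ag ∈ pvRuns s, groups.getD ag.1 [] = ag.2.map (·.1) := by
    intro ag hag
    obtain ⟨a, g⟩ := ag
    rw [hget, ← pvSorted_filter documents a, ← hs_def, pvRuns_filter s hpw hag]
  -- sorted(groups) is the run-author list
  have hkeys : groups.keys = PySem.Set.ofList (documents.map (·.2)) := by
    rw [hg_def]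
    rw [show (documents.foldl (fun d p => d.modify p.2 [] (· ++ [p.1]))
          (PySem.Dict.empty : PySem.Dict String (List String))).keys
        = PySem.Set.update (PySem.Dict.empty : PySem.Dict String (List String)).keys
            (documents.map (·.2)) from
      PySem.Dict.keys_foldl_modify_key documents (fun p => p.2) [] (fun _ p l => l ++ [p.1]) _]
    rw [PySem.Dict.keys_empty]
    rfl
  have hnd1 : ((pvRuns s).map (·.1)).Nodup := (pvRuns_authors_lt s hpw).imp ne_of_lt
  have hauthperm : ((pvRuns s).map (·.1)).Perm groups.keys := by
    rw [hkeys]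
    refine (List.perm_ext_iff_of_nodup hnd1 (PySem.Set.nodup_ofList _)).2 ?_
    intro a
    rw [PySem.Set.mem_ofList]
    constructor
    · intro ha
      rcases pvRuns_author_mem s ha with ⟨p, hp, rfl⟩
      exact List.mem_map.2 ⟨p, hperm.mem_iff.1 hp, rfl⟩
    · intro ha
      rcases List.mem_map.1 ha with ⟨p, hp, rfl⟩
      have hps : p ∈ s := hperm.mem_iff.2 hp
      have hfl : p ∈ (pvRuns s).flatMap (·.2) := (pvRuns_flatMap s).symm ▸ hps
      rcases List.mem_flatMap.1 hfl with ⟨ag, hag, hpg⟩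
      obtain ⟨a', g⟩ := ag
      have := (pvRuns_group_key s hag).2 p hpg
      exact List.mem_map.2 ⟨(a', g), hag, this.symm⟩
  have hsorted : PySem.List.sorted groups.keys (fun x => x) false = (pvRuns s).map (·.1) :=
    PySem.List.sorted_eq_of_perm_of_pairwise_lt _ _ _ hauthperm (pvRuns_authors_lt s hpw)
  rw [pvFoldA, hsorted, pvFoldB, pvKL _ _ hrun]
  refine Prod.mk.injEq .. ▸ ⟨by simp, ?_⟩
  simp only [List.nil_append]
  rw [List.flatMap_map]
  apply pvFlatMapCongr
  intro ag hag
  rw [hrun ag hag]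
  simp
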